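-- pv_equiv track=rewrite | github.com/ZeinabRabea/SuffixAligner | Mapping.py | rankBwt
-- ===== SOURCE A (Python) =====
-- def rankBwt(bw):
-- # return the repeat of each DNA element and the rank of each element
--     repeat=dict()
--     ranks=[]
--     for c in bw:
--         if c not in repeat: repeat[c]=0
--         ranks.append(repeat[c])
--         repeat[c]+=1
--     return ranks,repeat
-- ===== SOURCE B (Python) =====
-- def rankBwt(bw):
--     # group the positions of each character (keys in first-occurrence order),
--     # then scatter each position's rank into a pre-sized array
--     positions = {}
--     for i, c in enumerate(bw):
--         positions.setdefault(c, []).append(i)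
--     ranks = [0] * len(bw)
--     for ps in positions.values():
--         for r, p in enumerate(ps):
--             ranks[p] = r
--     repeat = {c: len(ps) for c, ps in positions.items()}
--     return ranks, repeat
-- ===== Notes on version B (the rewrite author's own statement) =====
-- stated objective: alternative
-- what changed: Instead of one running tally that interleaves rank lookups with count updates, B first groups the positions of each character into an insertion-ordered dict, then scatters each occurrence's index-within-its-group into a pre-sized ranks array and reads the totals off the group lengths.
import Mathlib
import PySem

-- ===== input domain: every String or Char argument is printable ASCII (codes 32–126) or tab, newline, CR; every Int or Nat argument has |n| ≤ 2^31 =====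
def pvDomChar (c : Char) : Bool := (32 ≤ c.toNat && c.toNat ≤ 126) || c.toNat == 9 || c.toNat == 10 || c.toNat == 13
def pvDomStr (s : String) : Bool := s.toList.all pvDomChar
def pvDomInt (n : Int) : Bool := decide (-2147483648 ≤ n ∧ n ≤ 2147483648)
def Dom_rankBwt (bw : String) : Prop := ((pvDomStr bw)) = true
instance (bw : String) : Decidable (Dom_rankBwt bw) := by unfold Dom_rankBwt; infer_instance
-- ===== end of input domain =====

-- B replaces A's single running tally (rank looked up and count bumped per step) by a
-- group-then-scatter decomposition: positions grouped per character, ranks scattered from the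
-- groups, totals read off the group lengths; objective: alternative (same O(n) cost).

-- ===== PORT A =====
-- loop body of A's single for-loop (named so the proofs can refer to it)
def rankBwtStep (st : PySem.Dict String Int × List Int) (c : Char) :
    PySem.Dict String Int × List Int :=
  let k := String.ofList [c]                    -- iterating a Python str yields 1-char strings
  let rep := if st.1.contains k then st.1 else st.1.insert k 0   -- if c not in repeat: repeat[c]=0
  let r := rep.getD k 0                         -- repeat[c]; the key is present here, so getD is exact
  (rep.insert k (r + 1), st.2 ++ [r])           -- repeat[c]+=1 ; ranks.append(r)

def rankBwt (bw : String) : List Int × (List (String × Int)) :=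
  let res := bw.toList.foldl rankBwtStep (PySem.Dict.empty, [])
  (res.2, res.1.items)

-- ===== PORT B =====
-- loop body of B's grouping loop: positions.setdefault(c, []).append(i)
def bwtPosStep (d : PySem.Dict String (List Int)) (p : Int × Char) :
    PySem.Dict String (List Int) :=
  d.modify (String.ofList [p.2]) [] (· ++ [p.1])

-- B's inner scatter loop: for r, p in enumerate(ps): ranks[p] = r
def bwtScatter (rs : List Int) (ps : List Int) : List Int :=
  (PySem.List.enumerate ps 0).foldl (fun rs q => PySem.List.pySetD rs q.2 q.1) rs

def rankBwt_alt (bw : String) : List Int × (List (String × Int)) :=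
  let l := bw.toList
  let positions := (PySem.List.enumerate l 0).foldl bwtPosStep PySem.Dict.empty
  let ranks := positions.values.foldl bwtScatter (List.replicate l.length 0)
  let rep := positions.items.foldl
      (fun d p => d.insert p.1 ((p.2.length : Int))) PySem.Dict.empty
  (ranks, rep.items)

-- ===== PRECONDITION & SPEC =====
def Spec_rankBwt (bw : String) (out : List Int × (List (String × Int))) : Prop := out = rankBwt_alt bw
instance (bw : String) (out : List Int × (List (String × Int))) : Decidable (Spec_rankBwt bw out) := by unfold Spec_rankBwt; infer_instance

-- ===== CLAIM (what is proved, stated in full; the proofs are below) =====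
def Claim_equal_rankBwt : Prop := ∀ (bw : String), Dom_rankBwt bw → Spec_rankBwt bw (rankBwt bw)

-- ===== LEMMAS AND PROOFS =====
-- the 1-char string a Python loop over a str yields
def keyOf (c : Char) : String := String.ofList [c]

lemma keyOf_inj : Function.Injective keyOf := by
  intro a b h
  have := congrArg String.toList h
  simpa [keyOf] using this

-- what both programs compute, index-parameterised: the rank of each element of t after prefix pre
def ranksSpec : List Char → List Char → List Int
  | _, [] => []
  | pre, c :: t => ((pre.count c : Int)) :: ranksSpec (pre ++ [c]) t

-- the items list both result dicts carry
def itemsSpec (l : List Char) : List (String × Int) :=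
  (PySem.Set.ofList l).map (fun c => (keyOf c, (l.count c : Int)))

-- positions of c in xs when enumeration starts at s (B's positions dict, per key)
def posL (c : Char) (s : Int) (xs : List Char) : List Int :=
  ((PySem.List.enumerate xs s).filter (fun p => p.2 == c)).map (·.1)

-- ---------- PySem.Set.ofList commutes with an injective map ----------
lemma set_update_map {α β : Type} [BEq α] [LawfulBEq α] [BEq β] [LawfulBEq β]
    (f : α → β) (hf : Function.Injective f) (l : List α) : ∀ (s : List α),
    PySem.Set.update (s.map f) (l.map f) = (PySem.Set.update s l).map f := by
  induction l with
  | nil => intro s; simp [PySem.Set.update]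
  | cons x l ih =>
    intro s
    have hadd : PySem.Set.add (s.map f) (f x) = (PySem.Set.add s x).map f := by
      by_cases hx : x ∈ s
      · simp [PySem.Set.add, hx, List.mem_map.mpr ⟨x, hx, rfl⟩]
      · have : f x ∉ s.map f := by
          intro hmem
          obtain ⟨y, hy, hfy⟩ := List.mem_map.mp hmem
          exact hx (hf hfy ▸ hy)
        simp [PySem.Set.add, hx, this]
    show PySem.Set.update (PySem.Set.add (s.map f) (f x)) (l.map f) = _
    rw [hadd, ih]
    rfl

lemma set_ofList_map {α β : Type} [BEq α] [LawfulBEq α] [BEq β] [LawfulBEq β]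
    (f : α → β) (hf : Function.Injective f) (l : List α) :
    PySem.Set.ofList (l.map f) = (PySem.Set.ofList l).map f := by
  have := set_update_map f hf l []
  simpa [PySem.Set.update, PySem.Set.ofList, PySem.Set.empty] using this

-- ---------- A side: the tally loop computes ranksSpec and a counter dict ----------
lemma rankBwtStep_eq (st : PySem.Dict String Int × List Int) (c : Char) :
    rankBwtStep st c =
      (st.1.insert (keyOf c) (st.1.getD (keyOf c) 0 + 1), st.2 ++ [st.1.getD (keyOf c) 0]) := by
  simp only [rankBwtStep, keyOf]
  by_cases h : st.1.contains (String.ofList [c])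
  · simp [h]
  · have h' : st.1.contains (String.ofList [c]) = false := by simpa using h
    rw [if_neg (by simp [h'])]
    rw [PySem.Dict.getD_of_not_contains _ _ h', PySem.Dict.insert_insert_self]
    simp [PySem.Dict.getD_insert_self]

lemma A_loop (t : List Char) : ∀ (pre : List Char) (r : List Int),
    t.foldl rankBwtStep (PySem.Dict.counter (pre.map keyOf), r)
      = (PySem.Dict.counter ((pre ++ t).map keyOf), r ++ ranksSpec pre t) := by
  induction t with
  | nil => intro pre r; simp [ranksSpec]
  | cons c t ih =>
    intro pre r
    rw [List.foldl_cons, rankBwtStep_eq]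
    have hcnt : (PySem.Dict.counter (pre.map keyOf)).getD (keyOf c) 0 = (pre.count c : Int) := by
      rw [PySem.Dict.getD_counter, List.count_map_of_injective _ _ keyOf_inj]
    have hins : (PySem.Dict.counter (pre.map keyOf)).insert (keyOf c)
        ((PySem.Dict.counter (pre.map keyOf)).getD (keyOf c) 0 + 1)
        = PySem.Dict.counter ((pre ++ [c]).map keyOf) := by
      rw [List.map_append]
      simp only [List.map_cons, List.map_nil]
      rw [PySem.Dict.counter_append_singleton]
      rfl
    simp only [hcnt] at hins ⊢
    rw [hins, ih (pre ++ [c]) (r ++ [(pre.count c : Int)])]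
    simp [ranksSpec]

lemma A_eq (bw : String) :
    rankBwt bw = (ranksSpec [] bw.toList, itemsSpec bw.toList) := by
  unfold rankBwt
  have h0 : (PySem.Dict.empty : PySem.Dict String Int) = PySem.Dict.counter (([] : List Char).map keyOf) := rfl
  rw [show ((PySem.Dict.empty : PySem.Dict String Int), ([] : List Int))
      = (PySem.Dict.counter (([] : List Char).map keyOf), ([] : List Int)) from rfl,
    A_loop]
  simp only [List.nil_append]
  rw [PySem.Dict.items_counter, set_ofList_map keyOf keyOf_inj]
  unfold itemsSpec
  rw [List.map_map]
  refine congrArg (Prod.mk _) (List.map_congr_left (fun x _ => ?_))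
  simp [Function.comp, List.count_map_of_injective _ _ keyOf_inj]

-- ---------- structure of posL ----------
lemma posL_nil (c : Char) (s : Int) : posL c s [] = [] := rfl

lemma posL_cons (c : Char) (s : Int) (x : Char) (xs : List Char) :
    posL c s (x :: xs) = (if x = c then [s] else []) ++ posL c (s + 1) xs := by
  by_cases h : x = c <;> simp [posL, PySem.List.enumerate, h]

lemma posL_bounds (c : Char) : ∀ (xs : List Char) (s : Int) (y : Int),
    y ∈ posL c s xs → s ≤ y ∧ y < s + xs.length := by
  intro xs
  induction xs with
  | nil => intro s y h; simp [posL_nil] at h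
  | cons x t ih =>
    intro s y h
    rw [posL_cons] at h
    rcases List.mem_append.mp h with h1 | h2
    · have hy : y = s := by
        by_cases hx : x = c
        · simpa [hx] using h1
        · simp [hx] at h1
      subst hy
      refine ⟨le_refl _, ?_⟩
      simp
    · have := ih (s+1) y h2
      constructor <;> [omega; (simp; omega)]

lemma posL_length (c : Char) : ∀ (xs : List Char) (s : Int),
    (posL c s xs).length = xs.count c := by
  intro xs
  induction xs with
  | nil => intro s; simp [posL_nil]
  | cons x t ih =>
    intro s
    rw [posL_cons]
    by_cases h : x = c <;> simp [h, ih]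

lemma posL_split (c : Char) : ∀ (j : Nat) (xs : List Char) (s : Int), j ≤ xs.length →
    posL c s xs = posL c s (xs.take j) ++ posL c (s + j) (xs.drop j) := by
  intro j
  induction j with
  | zero => intro xs s _; simp [posL_nil]
  | succ n ih =>
    intro xs s hj
    cases xs with
    | nil => simp at hj
    | cons x t =>
      rw [List.take_succ_cons, List.drop_succ_cons, posL_cons, posL_cons,
        ih t (s+1) (by simpa using hj)]
      simp [add_assoc]
      ring_nf

-- ---------- B side: the positions dict ----------
lemma positions_getD (l : List Char) (c : Char) :
    ((PySem.List.enumerate l 0).foldl bwtPosStep PySem.Dict.empty).getD (keyOf c) [] = posL c 0 l := by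
  have hfold : (PySem.List.enumerate l 0).foldl bwtPosStep PySem.Dict.empty
      = (((PySem.List.enumerate l 0).map (fun p => (keyOf p.2, p.1))).foldl
          (fun d q => d.modify q.1 [] (· ++ [q.2])) PySem.Dict.empty) := by
    rw [List.foldl_map]
    rfl
  rw [hfold, PySem.Dict.getD_foldl_modify_append]
  rw [PySem.Dict.getD_empty, List.nil_append]
  unfold posL
  rw [List.filter_map, List.map_map]
  refine congrArg _ (congrArg (fun f => List.filter f _) ?_)
  funext p
  simp only [Function.comp]
  by_cases h : p.2 = c
  · simp [h]
  · have hk : ¬ keyOf p.2 = keyOf c := fun hk => h (keyOf_inj hk)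
    simp [h, hk]

lemma positions_items (l : List Char) :
    ((PySem.List.enumerate l 0).foldl bwtPosStep PySem.Dict.empty).items
      = (PySem.Set.ofList l).map (fun c => (keyOf c, posL c 0 l)) := by
  have hkeys : ((PySem.List.enumerate l 0).foldl bwtPosStep PySem.Dict.empty).keys
      = (PySem.Set.ofList l).map keyOf := by
    have := PySem.Dict.keys_foldl_modify_key (PySem.List.enumerate l 0)
      (fun p => keyOf p.2) [] (fun _ p v => v ++ [p.1]) PySem.Dict.empty
    rw [show (PySem.List.enumerate l 0).foldl bwtPosStep PySem.Dict.empty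
        = (PySem.List.enumerate l 0).foldl
            (fun d x => d.modify ((fun p => keyOf p.2) x) [] ((fun _ p v => v ++ [p.1]) d x))
            PySem.Dict.empty from rfl, this]
    rw [show (PySem.List.enumerate l 0).map (fun p => keyOf p.2)
        = ((PySem.List.enumerate l 0).map (fun p => p.2)).map keyOf by rw [List.map_map]; rfl]
    rw [PySem.List.map_snd_enumerate]
    rw [show PySem.Set.update (PySem.Dict.empty : PySem.Dict String (List Int)).keys (l.map keyOf)
        = PySem.Set.ofList (l.map keyOf) from rfl]
    exact set_ofList_map keyOf keyOf_inj l
  have hnd : ((PySem.List.enumerate l 0).foldl bwtPosStep PySem.Dict.empty).keys.Nodup := by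
    refine PySem.Dict.nodup_keys_foldl_modify_key (PySem.List.enumerate l 0)
      (fun p => keyOf p.2) [] (fun _ p v => v ++ [p.1]) PySem.Dict.empty ?_
    simp [PySem.Dict.empty, PySem.Dict.keys]
  rw [PySem.Dict.items_eq_map_keys _ hnd [], hkeys, List.map_map]
  refine List.map_congr_left (fun x _ => ?_)
  simp only [Function.comp]
  rw [positions_getD]

lemma B_repeat (l : List Char) :
    (((PySem.List.enumerate l 0).foldl bwtPosStep PySem.Dict.empty).items.foldl
        (fun d p => d.insert p.1 ((p.2.length : Int))) PySem.Dict.empty).items = itemsSpec l := by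
  have hnd : ((((PySem.List.enumerate l 0).foldl bwtPosStep PySem.Dict.empty).items).map
      (fun p : String × List Int => p.1)).Nodup := by
    rw [positions_items, List.map_map]
    rw [show ((fun p : String × List Int => p.1) ∘ fun c => (keyOf c, posL c 0 l)) = keyOf from rfl]
    exact (PySem.Set.nodup_ofList l).map keyOf_inj
  have hfresh := PySem.Dict.items_foldl_insert_fresh
      ((PySem.List.enumerate l 0).foldl bwtPosStep PySem.Dict.empty).items
      (fun p : String × List Int => p.1) (fun p : String × List Int => (p.2.length : Int))
      PySem.Dict.empty (fun a _ => by simp [PySem.Dict.contains_empty]) hnd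
  refine Eq.trans hfresh ?_
  rw [positions_items]
  unfold itemsSpec
  rw [show (PySem.Dict.empty : PySem.Dict String Int).items = [] from rfl, List.nil_append,
    List.map_map]
  refine List.map_congr_left (fun x _ => ?_)
  simp [Function.comp, posL_length]

-- ---------- B side: the scatter ----------
lemma scatter_length (g : List Int) : ∀ (rs : List Int) (s : Int),
    ((PySem.List.enumerate g s).foldl (fun rs q => PySem.List.pySetD rs q.2 q.1) rs).length
      = rs.length := by
  induction g with
  | nil => intro rs s; rfl
  | cons p g ih =>
    intro rs s
    rw [PySem.List.enumerate_cons, List.foldl_cons, ih, PySem.List.length_pySetD]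

lemma scatter_miss (j : Nat) (g : List Int) : ∀ (rs : List Int) (s : Int),
    (j : Int) ∉ g → (∀ p ∈ g, 0 ≤ p) →
    ((PySem.List.enumerate g s).foldl (fun rs q => PySem.List.pySetD rs q.2 q.1) rs).getD j 0
      = rs.getD j 0 := by
  induction g with
  | nil => intro rs s _ _; rfl
  | cons p g ih =>
    intro rs s hj h0
    rw [PySem.List.enumerate_cons, List.foldl_cons]
    have hp : (0 : Int) ≤ p := h0 p (List.mem_cons_self)
    have hne : ¬ p.toNat = j := by
      intro h
      exact (List.mem_cons.not.mp hj) (Or.inl (by omega))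
    rw [ih _ (s := s + 1) (fun h => hj (List.mem_cons_of_mem _ h)) (fun q hq => h0 q (List.mem_cons_of_mem _ hq))]
    rw [PySem.List.pySetD_of_nonneg _ _ hp]
    simp [List.getD_eq_getElem?_getD, List.getElem?_set_ne hne]

lemma scatter_hit (j : Nat) (A B : List Int) (rs : List Int) (s : Int)
    (hj : j < rs.length) (hA : (j : Int) ∉ A) (hB : (j : Int) ∉ B)
    (h0 : ∀ p ∈ A ++ (j : Int) :: B, 0 ≤ p) :
    ((PySem.List.enumerate (A ++ (j : Int) :: B) s).foldl
        (fun rs q => PySem.List.pySetD rs q.2 q.1) rs).getD j 0 = s + A.length := by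
  induction A generalizing rs s with
  | nil =>
    simp only [List.nil_append, PySem.List.enumerate_cons, List.foldl_cons]
    rw [scatter_miss j B _ (s + 1) hB (fun q hq => h0 q (by simp [hq]))]
    rw [PySem.List.pySetD_of_nonneg _ _ (by positivity)]
    have : ((j : Int)).toNat = j := by omega
    rw [this]
    simp [List.getD_eq_getElem?_getD, hj]
  | cons p A ih =>
    simp only [List.cons_append, PySem.List.enumerate_cons, List.foldl_cons]
    have hp : (0 : Int) ≤ p := h0 p (by simp)
    have hrec := ih (PySem.List.pySetD rs p s) (s + 1)
      (by rw [PySem.List.length_pySetD]; exact hj)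
      (fun h => hA (List.mem_cons_of_mem _ h))
      (fun q hq => h0 q (by simpa using Or.inr hq))
    rw [hrec]
    simp
    ring

lemma ranksSpec_length : ∀ (t pre : List Char), (ranksSpec pre t).length = t.length := by
  intro t
  induction t with
  | nil => intro pre; rfl
  | cons c t ih => intro pre; simp [ranksSpec, ih]

lemma ranksSpec_getD : ∀ (t pre : List Char) (j : Nat), (hj : j < t.length) →
    (ranksSpec pre t).getD j 0 = (((pre ++ t).take (pre.length + j)).count (t[j]) : Int) := by
  intro t
  induction t with
  | nil => intro pre j hj; simp at hj
  | cons c t ih =>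
    intro pre j hj
    cases j with
    | zero => simp [ranksSpec]
    | succ n =>
      have hn : n < t.length := by simpa using hj
      rw [show ranksSpec pre (c :: t) = (pre.count c : Int) :: ranksSpec (pre ++ [c]) t from rfl]
      rw [List.getD_cons_succ, ih (pre ++ [c]) n hn, List.getElem_cons_succ]
      have hlen : (pre ++ [c]).length + n = pre.length + (n + 1) := by
        simp only [List.length_append, List.length_cons, List.length_nil]
        omega
      rw [List.append_assoc, hlen]
      simp only [List.singleton_append]

lemma posL_nonneg (c : Char) (l : List Char) : ∀ y ∈ posL c 0 l, 0 ≤ y := by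
  intro y hy
  exact ((posL_bounds c l 0 y hy).1)

-- membership/decomposition of posL at a position j of l
lemma posL_decomp (l : List Char) (j : Nat) (hj : j < l.length) (c : Char) (hc : l[j] = c) :
    posL c 0 l = posL c 0 (l.take j) ++ ((j : Int) :: posL c ((j : Int) + 1) (l.drop (j + 1))) := by
  rw [posL_split c j l 0 (le_of_lt hj), List.drop_eq_getElem_cons hj, posL_cons, hc]
  simp

lemma posL_not_mem (l : List Char) (j : Nat) (hj : j < l.length) (c : Char) (hc : ¬ l[j] = c) :
    (j : Int) ∉ posL c 0 l := by
  intro hmem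
  rw [posL_split c j l 0 (le_of_lt hj), List.drop_eq_getElem_cons hj, posL_cons,
    if_neg hc, List.nil_append] at hmem
  rcases List.mem_append.mp hmem with h1 | h2
  · have := (posL_bounds c (l.take j) 0 _ h1).2
    rw [List.length_take_of_le (le_of_lt hj)] at this
    omega
  · have := (posL_bounds c (l.drop (j + 1)) _ _ h2).1
    omega

-- one pass of B's outer scatter loop, seen from a fixed position j
lemma outer_getD (l : List Char) (j : Nat) (hj : j < l.length) : ∀ (cs : List Char) (rs : List Int),
    rs.length = l.length →
    ((cs.map (fun c => posL c 0 l)).foldl bwtScatter rs).getD j 0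
      = if l[j] ∈ cs then ((l.take j).count l[j] : Int) else rs.getD j 0 := by
  intro cs
  induction cs with
  | nil => intro rs _; simp
  | cons c cs ih =>
    intro rs hlen
    rw [List.map_cons, List.foldl_cons]
    have hslen : (bwtScatter rs (posL c 0 l)).length = l.length := by
      unfold bwtScatter
      rw [scatter_length, hlen]
    by_cases hc : l[j] = c
    · have hval : (bwtScatter rs (posL c 0 l)).getD j 0 = ((l.take j).count l[j] : Int) := by
        unfold bwtScatter
        rw [posL_decomp l j hj c hc]
        have hA : (j : Int) ∉ posL c 0 (l.take j) := by
          intro h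
          have := (posL_bounds c (l.take j) 0 _ h).2
          rw [List.length_take_of_le (le_of_lt hj)] at this
          omega
        have hB : (j : Int) ∉ posL c ((j : Int) + 1) (l.drop (j + 1)) := by
          intro h
          have := (posL_bounds c (l.drop (j + 1)) _ _ h).1
          omega
        have h0 : ∀ p ∈ posL c 0 (l.take j) ++ ((j : Int) :: posL c ((j : Int) + 1) (l.drop (j + 1))), 0 ≤ p := by
          intro p hp
          rcases List.mem_append.mp hp with h1 | h2
          · exact (posL_bounds c (l.take j) 0 _ h1).1
          · rcases List.mem_cons.mp h2 with h3 | h4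
            · omega
            · have := (posL_bounds c (l.drop (j + 1)) _ _ h4).1
              omega
        rw [scatter_hit j _ _ rs 0 (by omega) hA hB h0, posL_length, hc]
        simp
      have hm : l[j] ∈ c :: cs := by rw [hc]; exact List.mem_cons_self
      rw [ih _ hslen, hval, ite_self, if_pos hm]
    · have hval : (bwtScatter rs (posL c 0 l)).getD j 0 = rs.getD j 0 := by
        unfold bwtScatter
        exact scatter_miss j _ rs 0 (posL_not_mem l j hj c hc) (posL_nonneg c l)
      rw [ih _ hslen]
      have hm : (l[j] ∈ c :: cs) ↔ (l[j] ∈ cs) := by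
        simp [List.mem_cons, hc]
      by_cases hmem : l[j] ∈ cs
      · rw [if_pos hmem, if_pos (hm.mpr hmem)]
      · rw [if_neg hmem, if_neg (fun h => hmem (hm.mp h)), hval]

lemma outer_length : ∀ (gs : List (List Int)) (rs : List Int),
    (gs.foldl bwtScatter rs).length = rs.length := by
  intro gs
  induction gs with
  | nil => intro rs; rfl
  | cons g gs ih =>
    intro rs
    rw [List.foldl_cons, ih]
    unfold bwtScatter
    rw [scatter_length]

lemma B_ranks (l : List Char) :
    (((PySem.List.enumerate l 0).foldl bwtPosStep PySem.Dict.empty).values.foldl bwtScatter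
        (List.replicate l.length 0)) = ranksSpec [] l := by
  have hvals : ((PySem.List.enumerate l 0).foldl bwtPosStep PySem.Dict.empty).values
      = (PySem.Set.ofList l).map (fun c => posL c 0 l) := by
    unfold PySem.Dict.values
    rw [positions_items, List.map_map]
    rfl
  rw [hvals]
  have hlen : ((((PySem.Set.ofList l).map (fun c => posL c 0 l)).foldl bwtScatter
      (List.replicate l.length 0))).length = l.length := by
    rw [outer_length, List.length_replicate]
  refine List.ext_getElem (by rw [hlen, ranksSpec_length]) ?_
  intro j h1 h2
  have hj : j < l.length := by rwa [hlen] at h1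
  have hgd := outer_getD l j hj (PySem.Set.ofList l) (List.replicate l.length 0)
    (List.length_replicate)
  rw [if_pos ((PySem.Set.mem_ofList l _).mpr (List.getElem_mem hj))] at hgd
  rw [← List.getD_eq_getElem _ 0 h1, hgd, ← List.getD_eq_getElem _ 0 h2,
    ranksSpec_getD l [] j hj]
  simp

-- ===== VERDICT (by name: the statement is the Claim_ definition above) =====
theorem rankBwt_spec : Claim_equal_rankBwt := by
  intro bw _
  unfold Spec_rankBwt
  rw [A_eq]
  simp only [rankBwt_alt]
  rw [B_ranks, B_repeat]
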